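-- pv_equiv track=rewrite | github.com/RJ-acc/TMF-sample-ref-components | TMF760/source/ProductConfigurator/productConfigurationMicroservice/implementation/app.py | _select_fields
-- ===== SOURCE A (Python) =====
-- from typing import Any
--
-- def _select_fields(document: dict[str, Any], fields: str | None) -> dict[str, Any]:
--     if not fields:
--         return document
--     selected = {}
--     for field_name in [field.strip() for field in fields.split(",") if field.strip()]:
--         if field_name in document:
--             selected[field_name] = document[field_name]
--     return selected
-- ===== SOURCE B (Python) =====
-- def _pick(document, names):
--     if not names:
--         return {}
--     head, rest = names[0], names[1:]
--     if head in document: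
--         return {head: document[head], **_pick(document, rest)}
--     return _pick(document, rest)
--
--
-- def _select_fields(document, fields):
--     if not fields:
--         return document
--     names = list(dict.fromkeys(n for n in (f.strip() for f in fields.split(",")) if n))
--     return _pick(document, names)
-- ===== Notes on version B (the rewrite author's own statement) =====
-- stated objective: alternative
-- what changed: A accumulates matches into a dict by iterating the raw (possibly repeated) stripped field names; B first builds the ordered deduplicated name list (dict.fromkeys) and then selects with a structural recursion over it, consing each present (name, value) pair onto the recursive result.
import Mathlib
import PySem

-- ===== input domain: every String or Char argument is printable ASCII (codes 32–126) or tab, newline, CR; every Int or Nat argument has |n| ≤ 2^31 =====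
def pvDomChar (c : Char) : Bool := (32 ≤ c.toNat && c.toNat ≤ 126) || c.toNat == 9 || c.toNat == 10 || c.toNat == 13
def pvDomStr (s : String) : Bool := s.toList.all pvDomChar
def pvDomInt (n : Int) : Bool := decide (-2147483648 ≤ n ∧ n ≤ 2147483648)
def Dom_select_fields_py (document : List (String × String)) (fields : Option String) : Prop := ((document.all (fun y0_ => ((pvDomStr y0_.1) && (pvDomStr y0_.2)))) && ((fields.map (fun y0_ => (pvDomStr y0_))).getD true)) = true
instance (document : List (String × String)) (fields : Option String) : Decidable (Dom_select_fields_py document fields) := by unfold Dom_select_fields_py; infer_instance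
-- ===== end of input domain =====

-- B replaces A's accumulate-into-a-dict loop by an explicit ordered dedup of the field
-- names followed by a structural recursion that builds the selected pairs front-to-back;
-- objective: alternative decomposition (same cost).

-- ===== PORT A =====
-- A: loop over the stripped, non-empty field names, inserting matching entries into a dict.
def select_fields_py (document : List (String × String)) (fields : Option String) : List (String × String) :=
  match fields with
  | none => document
  | some fs =>
    if fs = "" then document
    else
      let doc : PySem.Dict String String := PySem.Dict.mk document
      let names := (((PySem.Str.split? fs ",").getD []).filter
          (fun f => PySem.Str.strip f != "")).map PySem.Str.strip
      (names.foldl (fun (sel : PySem.Dict String String) n =>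
          if doc.contains n then sel.insert n (doc.getD n "") else sel)
        PySem.Dict.empty).items

-- ===== PORT B =====
-- B's helper `_pick`: structural recursion over the (deduplicated) name list; since the
-- names are distinct, the Python `{head: document[head], **_pick(document, rest)}` merge
-- is exactly a cons of the head pair onto the recursive result.
def pickRec (doc : PySem.Dict String String) : List String → List (String × String)
  | [] => []
  | n :: rest =>
    match doc.get? n with
    | some v => (n, v) :: pickRec doc rest
    | none => pickRec doc rest

def select_fields_py_alt (document : List (String × String)) (fields : Option String) : List (String × String) :=
  match fields with
  | none => document
  | some fs =>
    if fs = "" then document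
    else
      let names := PySem.List.dedup
        ((((PySem.Str.split? fs ",").getD []).map PySem.Str.strip).filter (fun n => n != ""))
      pickRec (PySem.Dict.mk document) names

-- ===== PRECONDITION & SPEC =====
def Spec_select_fields_py (document : List (String × String)) (fields : Option String) (out : List (String × String)) : Prop := out = select_fields_py_alt document fields
instance (document : List (String × String)) (fields : Option String) (out : List (String × String)) : Decidable (Spec_select_fields_py document fields out) := by unfold Spec_select_fields_py; infer_instance

-- ===== CLAIM (what is proved, stated in full; the proofs are below) =====
def Claim_equal_select_fields_py : Prop := ∀ (document : List (String × String)) (fields : Option String), Dom_select_fields_py document fields → Spec_select_fields_py document fields (select_fields_py document fields)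

-- ===== LEMMAS AND PROOFS =====

-- ordered first-occurrence dedup, in cons form (proof-only helper)
def fdl : List String → List String
  | [] => []
  | n :: l => n :: (fdl l).filter (fun m => m != n)

theorem foldl_add_eq_fdl (l : List String) (s : List String) :
    l.foldl PySem.Set.add s = s ++ (fdl l).filter (fun m => !s.contains m) := by
  induction l generalizing s with
  | nil => simp [fdl]
  | cons n l ih =>
    simp only [List.foldl_cons, fdl]
    rw [ih]
    by_cases hc : s.contains n = true
    · have hmem : n ∈ s := by simpa using hc
      have hadd : PySem.Set.add s n = s := by simp [PySem.Set.add, hmem]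
      rw [hadd]
      simp only [List.filter_cons, hc, Bool.not_true]
      rw [List.filter_filter]
      congr 1
      apply List.filter_congr
      intro m _
      by_cases hm : m = n
      · subst hm; simp [hmem]
      · simp [hm]
    · have hcf : s.contains n = false := by simpa using hc
      have hmem : n ∉ s := by simpa using hcf
      have hadd : PySem.Set.add s n = s ++ [n] := by simp [PySem.Set.add, hmem]
      rw [hadd]
      simp only [List.filter_cons, hcf, Bool.not_false]
      rw [List.filter_filter]
      simp only [List.append_assoc, List.singleton_append]
      congr 2
      apply List.filter_congr
      intro m _
      by_cases hm : m = n
      · subst hm; simp [hmem]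
      · simp [hm]

theorem dedup_eq_fdl (l : List String) : PySem.List.dedup l = fdl l := by
  rw [PySem.List.dedup_eq_ofList, PySem.Set.ofList_eq_foldl, foldl_add_eq_fdl]
  simp

-- B's recursion selects exactly the present names, with their first-match values
theorem pickRec_eq_map (doc : PySem.Dict String String) (l : List String) :
    pickRec doc l
      = (l.filter (fun n => doc.contains n)).map (fun n => (n, doc.getD n "")) := by
  induction l with
  | nil => rfl
  | cons n rest ih =>
    simp only [pickRec, List.filter_cons]
    cases hg : doc.get? n with
    | none =>
      have hc : doc.contains n = false := by
        rw [PySem.Dict.contains_eq_isSome_get?, hg]; rfl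
      simp [hc, ih]
    | some v =>
      have hc : doc.contains n = true := by
        rw [PySem.Dict.contains_eq_isSome_get?, hg]; rfl
      have hd : doc.getD n "" = v := by
        rw [PySem.Dict.getD_eq_get?_getD, hg]; rfl
      simp [hc, ih, hd]

-- inserting a key with the value it already has leaves the dict unchanged
theorem insert_same (sel : PySem.Dict String String) (n : String) (v : String)
    (hnd : sel.keys.Nodup) (hg : sel.get? n = some v) : sel.insert n v = sel := by
  have hc : sel.contains n = true := by
    rw [PySem.Dict.contains_eq_isSome_get?, hg]; rfl
  apply PySem.Dict.ext
  rw [PySem.Dict.items_insert_of_contains sel v hc]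
  have hmap : ∀ p ∈ sel.items, (if (p.1 == n) = true then (n, v) else p) = p := by
    intro p hp
    by_cases hid : (p.1 == n) = true
    · have hpn : p.1 = n := by simpa using hid
      have hgv := PySem.Dict.get?_of_mem_items sel hp hnd
      rw [hpn, hg] at hgv
      have hv : p.2 = v := by simpa using hgv.symm
      simp only [hid, if_true]
      rw [← hpn, ← hv]
    · simp [hid]
  rw [List.map_congr_left hmap]
  simp

-- A's insertion loop, characterised over an arbitrary consistent accumulator
theorem foldl_insert_eq (doc : PySem.Dict String String) (names : List String)
    (sel : PySem.Dict String String) (hnd : sel.keys.Nodup)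
    (hsub : ∀ p ∈ sel.items, doc.get? p.1 = some p.2) :
    (names.foldl (fun sel n =>
        if doc.contains n then sel.insert n (doc.getD n "") else sel) sel).items
      = sel.items ++ ((fdl names).filter
          (fun n => doc.contains n && !sel.contains n)).map (fun n => (n, doc.getD n "")) := by
  induction names generalizing sel with
  | nil => simp [fdl]
  | cons n rest ih =>
    simp only [List.foldl_cons, fdl, List.filter_cons]
    by_cases hd : doc.contains n = true
    · by_cases hc : sel.contains n = true
      · -- already selected: insert of the same value is a no-op, n is filtered out
        obtain ⟨v, hg⟩ : ∃ v, sel.get? n = some v := by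
          have := PySem.Dict.contains_eq_isSome_get? sel n
          rw [hc] at this
          exact Option.isSome_iff_exists.mp this.symm
        have hv : doc.getD n "" = v := by
          have := hsub (n, v) (PySem.Dict.mem_items_of_get?_eq_some sel hg)
          rw [PySem.Dict.getD_eq_get?_getD, this]; rfl
        rw [if_pos hd, hv, insert_same sel n v hnd hg]
        rw [ih sel hnd hsub]
        simp only [hd, hc, Bool.not_true, Bool.and_false]
        rw [List.filter_filter]
        congr 2
        apply List.filter_congr
        intro m _
        by_cases hm : m = n
        · subst hm; simp [hc]
        · simp [hm]
      · -- fresh key: appended to the accumulator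
        have hcf : sel.contains n = false := by simpa using hc
        have hg : doc.getD n "" = (doc.get? n).getD "" := PySem.Dict.getD_eq_get?_getD doc n ""
        obtain ⟨w, hw⟩ : ∃ w, doc.get? n = some w := by
          have := PySem.Dict.contains_eq_isSome_get? doc n
          rw [hd] at this
          exact Option.isSome_iff_exists.mp this.symm
        rw [if_pos hd]
        rw [ih (sel.insert n (doc.getD n ""))
          (PySem.Dict.nodup_keys_insert sel n _ hnd)
          (by
            intro p hp
            rw [PySem.Dict.items_insert_of_not_contains sel _ hcf] at hp
            rcases List.mem_append.mp hp with h | h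
            · exact hsub p h
            · simp only [List.mem_singleton] at h
              subst h
              rw [hg, hw]; rfl)]
        rw [PySem.Dict.items_insert_of_not_contains sel _ hcf]
        simp only [hd, hcf, Bool.not_false, Bool.and_true, List.append_assoc,
          List.singleton_append]
        congr 2
        rw [List.filter_filter]
        congr 1
        apply List.filter_congr
        intro m _
        by_cases hm : m = n
        · subst hm; simp
        · cases hdm : doc.contains m <;> cases hsm : sel.contains m <;> simp [PySem.Dict.contains_insert, bne, hsm]
    · -- name absent from the document: skipped on both sides
      have hdf : doc.contains n = false := by simpa using hd
      rw [if_neg (by simp [hdf])]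
      rw [ih sel hnd hsub]
      simp only [hdf, Bool.false_and]
      rw [List.filter_filter]
      congr 2
      apply List.filter_congr
      intro m _
      by_cases hm : m = n
      · subst hm; simp [hdf]
      · simp [hm]

-- ===== VERDICT (by name: the statement is the Claim_ definition above) =====
theorem select_fields_py_spec : Claim_equal_select_fields_py := by
  intro document fields _
  unfold Spec_select_fields_py select_fields_py select_fields_py_alt
  cases fields with
  | none => rfl
  | some fs =>
    by_cases hfs : fs = ""
    · simp [hfs]
    · simp only [hfs, if_false]
      -- the two name lists coincide (filter∘map vs map∘filter)
      rw [List.filter_map]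
      rw [dedup_eq_fdl, pickRec_eq_map]
      rw [foldl_insert_eq (PySem.Dict.mk document) _ PySem.Dict.empty
        PySem.Dict.nodup_keys_empty (by intro p hp; simp [PySem.Dict.empty] at hp)]
      simp only [PySem.Dict.contains_empty, Bool.not_false, Bool.and_true]
      rfl
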